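-- pv_equiv track=rewrite | github.com/Project-08/Project-8 | project8/neural_network/checkpoints.py | str_format_modulelist_args_as_list
-- ===== SOURCE A (Python) =====
-- def str_format_modulelist_args_as_list(s: str) -> str:
--     start = s.find('ModuleList') + len('ModuleList') + 1
--     before = s[:start] + '['
--     out = ''
--     bracket_depth = 0
--     done = False
--     for char in s[start:]:
--         if done:
--             out += char
--             continue
--         if char == '(':
--             bracket_depth += 1
--             out += char
--         elif char == ')':
--             bracket_depth -= 1
--             if bracket_depth == 0:
--                 out += char + ','
--             elif bracket_depth == -1:
--                 out += ']' + char
--                 done = True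
--             else:
--                 out += char
--         else:
--             out += char
--     if 'ModuleList' in out:
--         out = str_format_modulelist_args_as_list(out)
--     return before + out
-- ===== SOURCE B (Python) =====
-- def _match(rest, i):
--     # index of the ')' matching the '(' at index i, or None
--     depth = 0
--     for j in range(i, len(rest)):
--         if rest[j] == '(':
--             depth += 1
--         elif rest[j] == ')':
--             depth -= 1
--             if depth == 0:
--                 return j
--     return None
--
--
-- def _transform(rest):
--     # split the region into top-level parenthesised groups: a ',' goes after
--     # each balanced group, ']' goes before the first unmatched ')', and the
--     # remainder after it is copied verbatim
--     parts = []
--     i = 0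
--     n = len(rest)
--     while i < n:
--         c = rest[i]
--         if c == ')':
--             return ''.join(parts) + ']' + rest[i:]
--         if c == '(':
--             j = _match(rest, i)
--             if j is None:
--                 return ''.join(parts) + rest[i:]
--             parts.append(rest[i:j + 1])
--             parts.append(',')
--             i = j + 1
--         else:
--             parts.append(c)
--             i += 1
--     return ''.join(parts)
--
--
-- def str_format_modulelist_args_as_list(s: str) -> str:
--     prefix = ''
--     while True:
--         start = s.find('ModuleList') + 11
--         prefix += s[:start] + '['
--         s = _transform(s[start:])
--         if 'ModuleList' not in s:
--             return prefix + s
-- ===== Notes on version B (the rewrite author's own statement) =====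
-- stated objective: alternative
-- what changed: The recursive peel-one-ModuleList driver becomes an iterative loop with an accumulated prefix, and the done-flag character state machine becomes a group decomposition: a find-matching-parenthesis helper splits the region into balanced top-level groups (a comma placed after each), the closing square bracket is placed before the first unmatched closing parenthesis and the tail is copied by slicing.
import Mathlib
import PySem

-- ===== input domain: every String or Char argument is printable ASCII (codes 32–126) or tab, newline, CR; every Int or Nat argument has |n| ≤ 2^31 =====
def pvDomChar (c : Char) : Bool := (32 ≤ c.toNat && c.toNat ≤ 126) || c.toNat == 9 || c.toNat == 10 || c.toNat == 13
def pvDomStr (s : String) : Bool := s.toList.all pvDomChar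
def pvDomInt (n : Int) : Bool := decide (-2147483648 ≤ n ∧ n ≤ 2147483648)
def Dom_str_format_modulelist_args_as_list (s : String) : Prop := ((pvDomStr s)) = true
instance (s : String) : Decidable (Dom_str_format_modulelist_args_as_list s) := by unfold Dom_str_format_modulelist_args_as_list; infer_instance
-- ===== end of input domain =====

-- B: same result; the recursive peel-one-ModuleList driver becomes an iterative loop with an accumulated
-- prefix, and the done-flag character state machine becomes a group decomposition: a matching-parenthesis
-- helper splits the region into balanced top-level groups (a comma placed after each), the closing square
-- bracket goes before the first unmatched closing parenthesis and the tail is copied by slicing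
-- (objective: alternative decomposition, same cost).

-- ===== PORT A =====
-- the literal 'ModuleList' (shared by both ports)
def pvWord : List Char := ['M', 'o', 'd', 'u', 'l', 'e', 'L', 'i', 's', 't']

-- proof-side characterisation of A's inner loop (used by A's termination argument below)
def pvParse : List Char → Int → List Char
  | [], _ => []
  | c :: rest, depth =>
    if c = ')' then
      if depth - 1 = -1 then ']' :: c :: rest
      else c :: ((if depth - 1 = 0 then [','] else []) ++ pvParse rest (depth - 1))
    else c :: pvParse rest (if c = '(' then depth + 1 else depth)

-- A's inner loop state machine: (out, bracket_depth, done)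
def pvStepA (st : List Char × Int × Bool) (c : Char) : List Char × Int × Bool :=
  if st.2.2 then (st.1 ++ [c], st.2.1, st.2.2)
  else if c = '(' then (st.1 ++ [c], st.2.1 + 1, st.2.2)
  else if c = ')' then
    if st.2.1 - 1 = 0 then (st.1 ++ [c, ','], st.2.1 - 1, st.2.2)
    else if st.2.1 - 1 = -1 then (st.1 ++ [']', c], st.2.1 - 1, true)
    else (st.1 ++ [c], st.2.1 - 1, st.2.2)
  else (st.1 ++ [c], st.2.1, st.2.2)

theorem pvFoldA_done (cs : List Char) : ∀ (out : List Char) (d : Int),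
    cs.foldl pvStepA (out, d, true) = (out ++ cs, d, true) := by
  induction cs with
  | nil => intro out d; simp
  | cons c rest ih => intro out d; simp [pvStepA, ih]

theorem pvFoldA_eq_parse (cs : List Char) : ∀ (out : List Char) (d : Int),
    (cs.foldl pvStepA (out, d, false)).1 = out ++ pvParse cs d := by
  induction cs with
  | nil => intro out d; simp [pvParse]
  | cons c rest ih =>
    intro out d
    by_cases hp : c = '('
    · simp [pvStepA, pvParse, hp, ih]
    · by_cases hc : c = ')'
      · by_cases h0 : d - 1 = 0
        · simp [pvStepA, pvParse, hc, h0, ih]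
        · by_cases h1 : d - 1 = -1
          · simp [pvStepA, pvParse, hc, h1, pvFoldA_done]
          · simp [pvStepA, pvParse, hc, h0, h1, ih]
      · simp [pvStepA, pvParse, hp, hc, ih]

-- insertion relation: r is t with extra ',' / ']' characters inserted
inductive pvIns : List Char → List Char → Prop
  | nil : pvIns [] []
  | keep (c : Char) {t r : List Char} : pvIns t r → pvIns (c :: t) (c :: r)
  | ins (c : Char) {t r : List Char} : (c = ',' ∨ c = ']') → pvIns t r → pvIns t (c :: r)

theorem pvIns_refl (t : List Char) : pvIns t t := by
  induction t with
  | nil => exact pvIns.nil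
  | cons c t ih => exact pvIns.keep c ih

theorem pvIns_parse (cs : List Char) : ∀ d : Int, pvIns cs (pvParse cs d) := by
  induction cs with
  | nil => intro d; exact pvIns.nil
  | cons c rest ih =>
    intro d
    by_cases hc : c = ')'
    · by_cases h1 : d - 1 = -1
      · simpa [pvParse, hc, h1] using
          pvIns.ins ']' (Or.inr rfl) (pvIns.keep c (pvIns_refl rest))
      · by_cases h0 : d - 1 = 0
        · simpa [pvParse, hc, h1, h0] using
            pvIns.keep c (pvIns.ins ',' (Or.inl rfl) (ih (d - 1)))
        · simpa [pvParse, hc, h1, h0] using pvIns.keep c (ih (d - 1))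
    · simpa [pvParse, hc] using pvIns.keep c (ih _)

theorem pvIns_count (t r : List Char) (h : pvIns t r) (c : Char)
    (hc1 : c ≠ ',') (hc2 : c ≠ ']') : r.count c = t.count c := by
  induction h with
  | nil => rfl
  | keep a _ ih => simp [List.count_cons, ih]
  | ins a ha _ ih =>
    have hne : ¬ a = c := by
      rcases ha with h' | h' <;> subst h' <;> exact fun hh => (by cases hh; simp_all)
    simp [ih, hne]

theorem pvIns_prefix (t r : List Char) (h : pvIns t r) :
    ∀ w : List Char, w ≠ [] → (',' : Char) ∉ w → (']' : Char) ∉ w → w <+: r → w <+: t := by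
  induction h with
  | nil => intro w hw _ _ hp; simp_all [List.prefix_nil]
  | keep a h ih =>
    intro w hw h1 h2 hp
    match w, hp with
    | [], _ => exact absurd rfl hw
    | b :: w', hp =>
      have hb : b = a := (List.cons_prefix_cons.mp hp).1
      have hw' : w' <+: _ := (List.cons_prefix_cons.mp hp).2
      subst hb
      by_cases hnil : w' = []
      · subst hnil; simpa using List.prefix_iff_eq_take.mpr (by simp)
      · exact List.cons_prefix_cons.mpr ⟨rfl, ih w' hnil (by simp_all) (by simp_all) hw'⟩
  | ins a ha h ih =>
    intro w hw h1 h2 hp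
    match w, hp with
    | [], _ => exact absurd rfl hw
    | b :: w', hp =>
      have hb : b = a := (List.cons_prefix_cons.mp hp).1
      subst hb
      rcases ha with h' | h' <;> subst h' <;> simp_all

theorem pvIns_infix (t r : List Char) (h : pvIns t r) :
    ∀ w : List Char, w ≠ [] → (',' : Char) ∉ w → (']' : Char) ∉ w → w <:+: r → w <:+: t := by
  induction h with
  | nil => intro w hw _ _ hp; simp_all
  | keep a h ih =>
    intro w hw h1 h2 hp
    rcases List.infix_cons_iff.mp hp with hpre | hinf
    · exact (List.infix_cons_iff).mpr (Or.inl (pvIns_prefix _ _ (pvIns.keep a h) w hw h1 h2 hpre))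
    · exact List.infix_cons (ih w hw h1 h2 hinf)
  | ins a ha h ih =>
    intro w hw h1 h2 hp
    rcases List.infix_cons_iff.mp hp with hpre | hinf
    · match w, hpre with
      | [], _ => exact absurd rfl hw
      | b :: w', hpre =>
        have hb : b = a := (List.cons_prefix_cons.mp hpre).1
        subst hb
        rcases ha with h' | h' <;> subst h' <;> simp_all
    · exact ih w hw h1 h2 hinf

-- the termination measure: each pass strictly lowers the number of 'L' characters
theorem pvMeasure_dec (s : List Char)
    (h : PySem.Chars.isIn pvWord
        (pvParse (PySem.Chars.slice s (some (PySem.Chars.find s pvWord + 10 + 1)) none) 0) = true) :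
    (pvParse (PySem.Chars.slice s (some (PySem.Chars.find s pvWord + 10 + 1)) none) 0).count 'L'
      < s.count 'L' := by
  have hb : -1 ≤ PySem.Chars.find s pvWord := PySem.Chars.neg_one_le_find s pvWord
  have h0 : (0 : Int) ≤ PySem.Chars.find s pvWord + 10 + 1 := by omega
  set n : Nat := (PySem.Chars.find s pvWord + 10 + 1).toNat with hn
  have hslice : PySem.Chars.slice s (some (PySem.Chars.find s pvWord + 10 + 1)) none = s.drop n := by
    rw [PySem.Chars.slice_eq_listSlice, PySem.List.slice_from _ h0]
  rw [hslice] at h ⊢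
  rw [pvIns_count _ _ (pvIns_parse _ 0) 'L' (by decide) (by decide)]
  by_cases hf : PySem.Chars.find s pvWord = -1
  · exfalso
    have hno : ¬ pvWord <:+: s := (PySem.Chars.find_eq_neg_one_iff s pvWord).mp hf
    have hinf := (PySem.Chars.isIn_iff_infix pvWord _).mp h
    have h2 := pvIns_infix _ _ (pvIns_parse _ 0) pvWord (by decide) (by decide) (by decide) hinf
    exact hno (h2.trans (List.drop_suffix n s).isInfix)
  · have hfpos : 0 ≤ PySem.Chars.find s pvWord := by omega
    have hpre := (PySem.Chars.find_spec hfpos).1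
    set k : Nat := (PySem.Chars.find s pvWord).toNat with hk
    obtain ⟨t, ht⟩ := hpre
    have hnk : n = k + 11 := by omega
    have hdrop : s.drop n = t.drop 1 := by
      rw [hnk, ← List.drop_drop, ← ht]
      simp [pvWord]
    have h1 : (s.drop n).count 'L' ≤ t.count 'L' := by
      rw [hdrop]; exact (List.drop_sublist 1 t).count_le 'L'
    have h2 : t.count 'L' < (s.drop k).count 'L' := by
      rw [← ht, List.count_append]
      have hw : pvWord.count 'L' = 1 := by decide
      omega
    have h3 : (s.drop k).count 'L' ≤ s.count 'L' := (List.drop_sublist k s).count_le 'L'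
    omega

-- A's driver, on List Char: literal transliteration of the Python
def pvGoA (s : List Char) : List Char :=
  let start := PySem.Chars.find s pvWord + 10 + 1
  let before := PySem.Chars.slice s none (some start) ++ ['[']
  let out := ((PySem.Chars.slice s (some start) none).foldl pvStepA ([], 0, false)).1
  let out := if PySem.Chars.isIn pvWord out then pvGoA out else out
  before ++ out
termination_by s.count 'L'
decreasing_by
  rename_i h
  have h2 : PySem.Chars.isIn pvWord
      (pvParse (PySem.Chars.slice s (some (PySem.Chars.find s pvWord + 10 + 1)) none) 0) = true := by
    have h3 : PySem.Chars.isIn pvWord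
        (((PySem.Chars.slice s (some (PySem.Chars.find s pvWord + 10 + 1)) none).foldl
          pvStepA ([], (0 : Int), false)).1) = true := h
    rwa [pvFoldA_eq_parse, List.nil_append] at h3
  show (((PySem.Chars.slice s (some (PySem.Chars.find s pvWord + 10 + 1)) none).foldl
      pvStepA ([], (0 : Int), false)).1).count 'L' < s.count 'L'
  rw [pvFoldA_eq_parse, List.nil_append]
  exact pvMeasure_dec s h2

def str_format_modulelist_args_as_list (s : String) : String :=
  String.ofList (pvGoA s.toList)

-- ===== PORT B =====
-- _match: split the list after the closing parenthesis that returns the running depth to zero, or none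
def pvMatch : List Char → Int → Option (List Char × List Char)
  | [], _ => none
  | c :: t, d =>
    if c = '(' then (pvMatch t (d + 1)).map (fun p => (c :: p.1, p.2))
    else if c = ')' then
      if d - 1 = 0 then some ([c], t)
      else (pvMatch t (d - 1)).map (fun p => (c :: p.1, p.2))
    else (pvMatch t d).map (fun p => (c :: p.1, p.2))

theorem pvMatch_some_length (cs : List Char) : ∀ (d : Int) (a b : List Char),
    pvMatch cs d = some (a, b) → b.length < cs.length := by
  induction cs with
  | nil => intro d a b h; simp [pvMatch] at h
  | cons c t ih =>
    intro d a b h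
    rw [pvMatch] at h
    split at h
    · simp only [Option.map_eq_some_iff] at h
      obtain ⟨⟨a', b'⟩, hp, he⟩ := h; cases he
      exact Nat.lt_succ_of_lt (ih _ _ _ hp)
    · split at h
      · split at h
        · cases h; simp
        · simp only [Option.map_eq_some_iff] at h
          obtain ⟨⟨a', b'⟩, hp, he⟩ := h; cases he
          exact Nat.lt_succ_of_lt (ih _ _ _ hp)
      · simp only [Option.map_eq_some_iff] at h
        obtain ⟨⟨a', b'⟩, hp, he⟩ := h; cases he
        exact Nat.lt_succ_of_lt (ih _ _ _ hp)

-- _transform: B's group decomposition of one ModuleList region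
def pvTransform : List Char → List Char
  | [] => []
  | c :: t =>
    if c = ')' then ']' :: c :: t
    else if c = '(' then
      match hm : pvMatch (c :: t) 0 with
      | none => c :: t
      | some (grp, rest) => grp ++ ',' :: pvTransform rest
    else c :: pvTransform t
termination_by cs => cs.length
decreasing_by
  · exact pvMatch_some_length _ _ _ _ hm
  · simp

theorem pvTransform_paren (t : List Char) :
    pvTransform ('(' :: t) = (match pvMatch ('(' :: t) 0 with
      | none => '(' :: t
      | some (grp, rest) => grp ++ ',' :: pvTransform rest) := by
  rw [pvTransform]
  simp only [if_neg (by decide : ¬ ('(' : Char) = ')')]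
  cases hm : pvMatch ('(' :: t) 0 with
  | none => simp
  | some p => cases p; simp

theorem pvParse_match (cs : List Char) : ∀ d : Int, 1 ≤ d →
    pvParse cs d = (match pvMatch cs d with
      | some (a, b) => a ++ ',' :: pvParse b 0
      | none => cs) := by
  induction cs with
  | nil => intro d hd; simp [pvParse, pvMatch]
  | cons c t ih =>
    intro d hd
    by_cases hc : c = ')'
    · subst hc
      by_cases h1 : d = 1
      · subst h1
        simp [pvParse, pvMatch]
      · have e1 : ¬ (d - 1 = -1) := by omega
        have e0 : ¬ (d - 1 = 0) := by omega
        rw [pvParse, pvMatch]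
        simp only [if_neg e1, if_neg e0,
          show (if (')' : Char) = '(' then d + 1 else d) = d by simp,
          if_neg (by decide : ¬ (')' : Char) = '('), if_true]
        rw [ih (d - 1) (by omega)]
        cases hm : pvMatch t (d - 1) with
        | none => simp
        | some p => cases p; simp
    · by_cases hp : c = '('
      · subst hp
        rw [pvParse, pvMatch]
        simp only [if_neg hc, if_true]
        rw [ih (d + 1) (by omega)]
        cases hm : pvMatch t (d + 1) with
        | none => simp
        | some p => cases p; simp
      · rw [pvParse, pvMatch]
        simp only [if_neg hc, if_neg hp]
        rw [ih d hd]
        cases hm : pvMatch t d with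
        | none => simp
        | some p => cases p; simp

theorem pvTransform_eq_parse (n : Nat) : ∀ cs : List Char, cs.length = n →
    pvTransform cs = pvParse cs 0 := by
  induction n using Nat.strong_induction_on with
  | _ n ih =>
    intro cs hn
    match cs with
    | [] => simp [pvTransform, pvParse]
    | c :: t =>
      by_cases hc : c = ')'
      · subst hc; simp [pvTransform, pvParse]
      · by_cases hp : c = '('
        · subst hp
          have hparse : pvParse ('(' :: t) 0 = '(' :: pvParse t 1 := by
            simp [pvParse]
          have hmatch : pvMatch ('(' :: t) 0 = (pvMatch t 1).map (fun p => ('(' :: p.1, p.2)) := by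
            rw [pvMatch]; simp
          rw [pvTransform_paren, hparse, pvParse_match t 1 (by norm_num), hmatch]
          cases hm : pvMatch t 1 with
          | none => simp
          | some p =>
            obtain ⟨a, b⟩ := p
            have hblen : b.length < t.length := pvMatch_some_length t 1 a b hm
            simp only [Option.map_some]
            simp
            exact ih b.length (by simp at hn; omega) b rfl
        · rw [pvTransform, pvParse]
          simp only [if_neg hc, if_neg hp]
          rw [ih t.length (by simp [← hn]) t rfl]

-- B's driver: do-while loop with accumulated prefix, region rewritten by pvTransform
def pvGoB (pre s : List Char) : List Char :=
  let start := PySem.Chars.find s pvWord + 11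
  let pre' := pre ++ PySem.Chars.slice s none (some start) ++ ['[']
  let s' := pvTransform (PySem.Chars.slice s (some start) none)
  if PySem.Chars.isIn pvWord s' then pvGoB pre' s' else pre' ++ s'
termination_by s.count 'L'
decreasing_by
  rename_i h
  have h11 : PySem.Chars.find s pvWord + 11 = PySem.Chars.find s pvWord + 10 + 1 := by ring
  have ht : pvTransform (PySem.Chars.slice s (some (PySem.Chars.find s pvWord + 11)) none)
      = pvParse (PySem.Chars.slice s (some (PySem.Chars.find s pvWord + 11)) none) 0 :=
    pvTransform_eq_parse _ _ rfl
  have h2 : PySem.Chars.isIn pvWord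
      (pvParse (PySem.Chars.slice s (some (PySem.Chars.find s pvWord + 10 + 1)) none) 0) = true := by
    rw [← h11, ← ht]; exact h
  show (pvTransform (PySem.Chars.slice s (some (PySem.Chars.find s pvWord + 11)) none)).count 'L'
      < s.count 'L'
  rw [ht, h11]
  exact pvMeasure_dec s h2

def str_format_modulelist_args_as_list_alt (s : String) : String :=
  String.ofList (pvGoB [] s.toList)

-- ===== PRECONDITION & SPEC =====
def Spec_str_format_modulelist_args_as_list (s : String) (out : String) : Prop := out = str_format_modulelist_args_as_list_alt s
instance (s : String) (out : String) : Decidable (Spec_str_format_modulelist_args_as_list s out) := by unfold Spec_str_format_modulelist_args_as_list; infer_instance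

-- ===== CLAIM (what is proved, stated in full; the proofs are below) =====
def Claim_equal_str_format_modulelist_args_as_list : Prop := ∀ (s : String), Dom_str_format_modulelist_args_as_list s → Spec_str_format_modulelist_args_as_list s (str_format_modulelist_args_as_list s)

-- ===== LEMMAS AND PROOFS =====

theorem pvGoB_eq_goA (n : Nat) : ∀ s pre : List Char, s.count 'L' = n →
    pvGoB pre s = pre ++ pvGoA s := by
  induction n using Nat.strong_induction_on with
  | _ n ih =>
    intro s pre hn
    rw [pvGoB.eq_def, pvGoA.eq_def]
    have h11 : PySem.Chars.find s pvWord + 11 = PySem.Chars.find s pvWord + 10 + 1 := by ring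
    simp only [h11, pvFoldA_eq_parse, List.nil_append,
      pvTransform_eq_parse _ (PySem.Chars.slice s (some (PySem.Chars.find s pvWord + 10 + 1)) none) rfl]
    set s' := pvParse (PySem.Chars.slice s (some (PySem.Chars.find s pvWord + 10 + 1)) none) 0 with hs'
    by_cases hc : PySem.Chars.isIn pvWord s' = true
    · have hdec : s'.count 'L' < s.count 'L' := pvMeasure_dec s hc
      rw [if_pos hc, if_pos hc,
        ih (s'.count 'L') (by rw [← hn]; exact hdec) s' _ rfl]
      simp
    · rw [if_neg hc, if_neg hc]; simp

-- ===== VERDICT (by name: the statement is the Claim_ definition above) =====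
theorem str_format_modulelist_args_as_list_spec : Claim_equal_str_format_modulelist_args_as_list := by
  intro s _
  unfold Spec_str_format_modulelist_args_as_list str_format_modulelist_args_as_list str_format_modulelist_args_as_list_alt
  rw [pvGoB_eq_goA (s.toList.count 'L') s.toList [] rfl]
  simp
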